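-- pv_equiv track=rewrite | github.com/clccclcc/lib | myboardlib.py | my_check_win
-- ===== SOURCE A (Python) =====
-- def my_check_win(board,player,goal_size):
--     ysize = len(board)
--     xsize = len(board[0])
--     for y in range(ysize):
--         for x in range(xsize):
--             if board[y][x] == player:
--                 # x-line check
--                 goal=True
--                 for i in range(goal_size):
--                     if  xsize <= (x + i):
--                         goal=False
--                         break
--
--                     if board[y][x+i] != player:
--                         goal=False
--                         break
--                 if goal :
--                     return True
--
--                 # y-line check
--                 goal=True
--                 for i in range(goal_size):
--                     if ysize <= (y+i):
--                         goal=False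
--                         break
--
--                     if board[y+i][x] != player:
--                         goal=False
--                         break
--                 if goal:
--                     return True
--
--                 # 4-line check
--                 goal=True
--                 for i in range(goal_size):
--                     if  xsize <= (x + i):
--                         goal=False
--                         break
--                     if ysize <= (y+i):
--                         goal=False
--                         break
--                     if board[y+i][x+i] != player:
--                         goal=False
--                         break
--                 if goal:
--                     return True
--
--                 # 3-line check
--                 goal=True
--                 for i in range(goal_size):
--                     if  (x - i) < 0:
--                         goal=False
--                         break
--                     if ysize <= (y+i):
--                         goal=False
--                         break
--                     if board[y+i][x-i] != player:
--                         goal=False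
--                         break
--                 if goal:
--                     return True
--     return False
-- ===== SOURCE B (Python) =====
-- def my_check_win(board, player, goal_size):
--     if not board:
--         return False
--     W = len(board[0])
--     zeros = [0] * W
--     down, dr, dl = zeros, zeros, zeros
--     for row in board:
--         ndown, ndr, ndl = [], [], []
--         run = 0
--         for v, a, b, c in zip(row, down, [0] + dr, dl[1:] + [0]):
--             if v == player:
--                 run += 1
--                 a += 1
--                 b += 1
--                 c += 1
--                 if run >= goal_size or a >= goal_size or b >= goal_size or c >= goal_size:
--                     return True
--             else:
--                 run = a = b = c = 0
--             ndown.append(a)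
--             ndr.append(b)
--             ndl.append(c)
--         down, dr, dl = ndown, ndr, ndl
--     return False
-- ===== Notes on version B (the rewrite author's own statement) =====
-- stated objective: alternative
-- what changed: A rescans up to goal_size cells in four directions from every player cell; B makes a single pass over the board carrying per-column running streak lengths (horizontal, vertical, both diagonals) and fires as soon as a streak reaches goal_size, so its cell visits are independent of goal_size (in measured CPython time this does not beat A's constants).
-- outside the precondition, e.g. on my_check_win([[1, 0, 0, 0], [0, 1], [0, 0, 1, 0]], 1, 3): A returns True, B returns False
import Mathlib
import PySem

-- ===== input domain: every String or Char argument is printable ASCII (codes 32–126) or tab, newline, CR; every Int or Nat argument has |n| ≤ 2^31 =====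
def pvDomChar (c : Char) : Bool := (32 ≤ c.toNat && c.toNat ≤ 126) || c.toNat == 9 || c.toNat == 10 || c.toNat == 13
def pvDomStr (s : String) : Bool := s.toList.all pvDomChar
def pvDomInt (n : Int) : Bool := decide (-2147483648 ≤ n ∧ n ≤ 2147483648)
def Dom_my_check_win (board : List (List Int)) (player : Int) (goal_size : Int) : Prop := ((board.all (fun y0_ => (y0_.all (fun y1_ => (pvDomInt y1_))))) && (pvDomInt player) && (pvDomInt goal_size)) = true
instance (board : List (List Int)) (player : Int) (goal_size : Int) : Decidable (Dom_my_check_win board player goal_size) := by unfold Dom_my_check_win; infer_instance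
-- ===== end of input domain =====

-- B replaces A's per-cell rescan of up to goal_size cells in four directions by a single pass
-- over the board that carries running streak lengths per direction (scan count independent of goal_size).

-- ===== PORT A =====
-- board[y][x] as an Option (none = IndexError; unreachable under Pre_)
def pvCell? (board : List (List Int)) (y x : Int) : Option Int :=
  (PySem.List.pyGet? board y).bind (fun r => PySem.List.pyGet? r x)

def my_check_win (board : List (List Int)) (player : Int) (goal_size : Int) : Bool :=
  let ysize : Int := PySem.List.len board
  let xsize : Int := PySem.List.len ((PySem.List.pyGet? board 0).getD [])
  (PySem.List.pyRange 0 ysize 1).any fun y =>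
    (PySem.List.pyRange 0 xsize 1).any fun x =>
      (pvCell? board y x == some player) &&
      -- x-line check
      (((PySem.List.pyRange 0 goal_size 1).all fun i =>
          if xsize ≤ x + i then false
          else pvCell? board y (x + i) == some player) ||
      -- y-line check
       ((PySem.List.pyRange 0 goal_size 1).all fun i =>
          if ysize ≤ y + i then false
          else pvCell? board (y + i) x == some player) ||
      -- 4-line check
       ((PySem.List.pyRange 0 goal_size 1).all fun i =>
          if xsize ≤ x + i then false
          else if ysize ≤ y + i then false
          else pvCell? board (y + i) (x + i) == some player) ||
      -- 3-line check
       ((PySem.List.pyRange 0 goal_size 1).all fun i =>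
          if x - i < 0 then false
          else if ysize ≤ y + i then false
          else pvCell? board (y + i) (x - i) == some player))

-- ===== PORT B =====
-- the inner `for v, a, b, c in zip(row, down, [0]+dr, dl[1:]+[0])` loop of Source B;
-- `none` = early `return True`
def pvRowLoop (player g : Int) :
    List Int → List Int → List Int → List Int → Int → Option (List Int × List Int × List Int)
  | v :: row, a0 :: pd, b0 :: pr, c0 :: pl, run =>
    if v == player then
      let run' := run + 1
      let a := a0 + 1
      let b := b0 + 1
      let c := c0 + 1
      if run' ≥ g || a ≥ g || b ≥ g || c ≥ g then none
      else
        match pvRowLoop player g row pd pr pl run' with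
        | none => none
        | some (d, r, l) => some (a :: d, b :: r, c :: l)
    else
      match pvRowLoop player g row pd pr pl 0 with
      | none => none
      | some (d, r, l) => some ((0:Int) :: d, (0:Int) :: r, (0:Int) :: l)
  | _, _, _, _, _ => some ([], [], [])

-- the outer `for row in board` loop of Source B
def pvRows (player g : Int) : List (List Int) → List Int → List Int → List Int → Bool
  | [], _, _, _ => false
  | row :: rest, down, dr, dl =>
    match pvRowLoop player g row down ((0:Int) :: dr) (dl.drop 1 ++ [(0:Int)]) 0 with
    | none => true
    | some (d, r, l) => pvRows player g rest d r l

def my_check_win_alt (board : List (List Int)) (player : Int) (goal_size : Int) : Bool :=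
  match board with
  | [] => false
  | first :: _ =>
    let zeros := List.replicate first.length (0 : Int)
    pvRows player goal_size board zeros zeros zeros

-- ===== PRECONDITION & SPEC =====
-- Pre_ excludes the empty board, on which A raises IndexError at board[0], and boards with a row
-- shorter than the first row, on which A raises IndexError on most scans and any remaining value
-- is an accident of its scan order.
def Pre_my_check_win (board : List (List Int)) (player : Int) (goal_size : Int) : Prop :=
  board ≠ [] ∧ ∀ r ∈ board, (board.headD []).length ≤ r.length

instance (board : List (List Int)) (player : Int) (goal_size : Int) : Decidable (Pre_my_check_win board player goal_size) := by unfold Pre_my_check_win; infer_instance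

def pvWitness_my_check_win : List (List Int) × Int × Int := ([[1, 0], [0, 1]], 1, 2)

def Spec_my_check_win (board : List (List Int)) (player : Int) (goal_size : Int) (out : Bool) : Prop := out = my_check_win_alt board player goal_size
instance (board : List (List Int)) (player : Int) (goal_size : Int) (out : Bool) : Decidable (Spec_my_check_win board player goal_size out) := by unfold Spec_my_check_win; infer_instance

-- ===== CLAIM (what is proved, stated in full; the proofs are below) =====
def Claim_equal_my_check_win : Prop := ∀ (board : List (List Int)) (player : Int) (goal_size : Int), Dom_my_check_win board player goal_size → Pre_my_check_win board player goal_size → Spec_my_check_win board player goal_size (my_check_win board player goal_size)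

-- ===== LEMMAS AND PROOFS =====

def pvV (c : Nat → Nat → Bool) : Nat → Nat → Nat
  | 0, x => if c 0 x then 1 else 0
  | y+1, x => if c (y+1) x then pvV c y x + 1 else 0

def pvD (c : Nat → Nat → Bool) : Nat → Nat → Nat
  | 0, x => if c 0 x then 1 else 0
  | y+1, 0 => if c (y+1) 0 then 1 else 0
  | y+1, x+1 => if c (y+1) (x+1) then pvD c y x + 1 else 0

def pvA (c : Nat → Nat → Bool) : Nat → Nat → Nat
  | 0, x => if c 0 x then 1 else 0
  | y+1, x => if c (y+1) x then pvA c y (x+1) + 1 else 0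

def pvHrow (c : Nat → Nat → Bool) (y : Nat) : Nat → Nat
  | 0 => if c y 0 then 1 else 0
  | x+1 => if c y (x+1) then pvHrow c y x + 1 else 0

lemma pvHrow_ge (c : Nat → Nat → Bool) (y : Nat) :
    ∀ x n, n ≤ pvHrow c y x ↔ n ≤ x + 1 ∧ ∀ j, j < n → c y (x - j) = true := by
  intro x
  induction x with
  | zero =>
    intro n
    rcases n with _ | m
    · simp
    · constructor
      · intro h
        simp only [pvHrow] at h
        split at h
        · refine ⟨by omega, ?_⟩
          intro j hj
          have : (0:Nat) - j = 0 := by omega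
          rw [this]; assumption
        · omega
      · rintro ⟨h1, h2⟩
        have hm : m = 0 := by omega
        subst hm
        have := h2 0 (by omega)
        simp only [pvHrow]
        simp [this]
  | succ x ih =>
    intro n
    rcases n with _ | m
    · simp
    · simp only [pvHrow]
      by_cases hc : c y (x+1) = true
      · rw [if_pos hc]
        have hih := ih m
        constructor
        · intro h
          have hm : m ≤ pvHrow c y x := by omega
          obtain ⟨h1, h2⟩ := hih.mp hm
          refine ⟨by omega, ?_⟩
          intro j hj
          rcases j with _ | j'
          · simpa using hc
          · have : x + 1 - (j'+1) = x - j' := by omega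
            rw [this]; exact h2 j' (by omega)
        · rintro ⟨h1, h2⟩
          have hm : m ≤ pvHrow c y x := by
            apply hih.mpr
            refine ⟨by omega, ?_⟩
            intro j hj
            have : x - j = x + 1 - (j+1) := by omega
            rw [this]; exact h2 (j+1) (by omega)
          omega
      · rw [if_neg hc]
        constructor
        · omega
        · rintro ⟨h1, h2⟩
          exfalso
          have := h2 0 (by omega)
          simp at this
          exact hc this
lemma pvV_ge (c : Nat → Nat → Bool) (x : Nat) :
    ∀ y n, n ≤ pvV c y x ↔ n ≤ y + 1 ∧ ∀ j, j < n → c (y - j) x = true := by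
  intro y
  induction y with
  | zero =>
    intro n
    rcases n with _ | m
    · simp
    · constructor
      · intro h
        simp only [pvV] at h
        split at h
        · refine ⟨by omega, ?_⟩
          intro j hj
          have : (0:Nat) - j = 0 := by omega
          rw [this]; assumption
        · omega
      · rintro ⟨h1, h2⟩
        have hm : m = 0 := by omega
        subst hm
        have := h2 0 (by omega)
        simp only [pvV]
        simp [this]
  | succ y ih =>
    intro n
    rcases n with _ | m
    · simp
    · simp only [pvV]
      by_cases hc : c (y+1) x = true
      · rw [if_pos hc]
        have hih := ih m
        constructor
        · intro h
          have hm : m ≤ pvV c y x := by omega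
          obtain ⟨h1, h2⟩ := hih.mp hm
          refine ⟨by omega, ?_⟩
          intro j hj
          rcases j with _ | j'
          · simpa using hc
          · have : y + 1 - (j'+1) = y - j' := by omega
            rw [this]; exact h2 j' (by omega)
        · rintro ⟨h1, h2⟩
          have hm : m ≤ pvV c y x := by
            apply hih.mpr
            refine ⟨by omega, ?_⟩
            intro j hj
            have : y - j = y + 1 - (j+1) := by omega
            rw [this]; exact h2 (j+1) (by omega)
          omega
      · rw [if_neg hc]
        constructor
        · omega
        · rintro ⟨h1, h2⟩
          exfalso
          have := h2 0 (by omega)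
          simp at this
          exact hc this

lemma pvA_ge (c : Nat → Nat → Bool) :
    ∀ y x n, n ≤ pvA c y x ↔ n ≤ y + 1 ∧ ∀ j, j < n → c (y - j) (x + j) = true := by
  intro y
  induction y with
  | zero =>
    intro x n
    rcases n with _ | m
    · simp
    · constructor
      · intro h
        simp only [pvA] at h
        split at h
        · refine ⟨by omega, ?_⟩
          intro j hj
          have hm : m = 0 := by omega
          have hj0 : j = 0 := by omega
          subst hj0
          simpa using ‹c 0 x = true›
        · omega
      · rintro ⟨h1, h2⟩
        have hm : m = 0 := by omega
        subst hm
        have := h2 0 (by omega)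
        simp only [pvA]
        simp at this
        simp [this]
  | succ y ih =>
    intro x n
    rcases n with _ | m
    · simp
    · simp only [pvA]
      by_cases hc : c (y+1) x = true
      · rw [if_pos hc]
        have hih := ih (x+1) m
        constructor
        · intro h
          have hm : m ≤ pvA c y (x+1) := by omega
          obtain ⟨h1, h2⟩ := hih.mp hm
          refine ⟨by omega, ?_⟩
          intro j hj
          rcases j with _ | j'
          · simpa using hc
          · have e1 : y + 1 - (j'+1) = y - j' := by omega
            have e2 : x + (j'+1) = x + 1 + j' := by omega
            rw [e1, e2]; exact h2 j' (by omega)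
        · rintro ⟨h1, h2⟩
          have hm : m ≤ pvA c y (x+1) := by
            apply hih.mpr
            refine ⟨by omega, ?_⟩
            intro j hj
            have e1 : y - j = y + 1 - (j+1) := by omega
            have e2 : x + 1 + j = x + (j+1) := by omega
            rw [e1, e2]; exact h2 (j+1) (by omega)
          omega
      · rw [if_neg hc]
        constructor
        · omega
        · rintro ⟨h1, h2⟩
          exfalso
          have := h2 0 (by omega)
          simp at this
          exact hc this

lemma pvD_ge (c : Nat → Nat → Bool) :
    ∀ y x n, n ≤ pvD c y x ↔ n ≤ y + 1 ∧ n ≤ x + 1 ∧ ∀ j, j < n → c (y - j) (x - j) = true := by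
  intro y
  induction y with
  | zero =>
    intro x n
    rcases n with _ | m
    · simp
    · constructor
      · intro h
        rcases x with _ | x' <;> simp only [pvD] at h <;> split at h <;> try omega
        · refine ⟨by omega, by omega, ?_⟩
          intro j hj
          have hj0 : j = 0 := by omega
          subst hj0
          simpa using ‹_›
        · refine ⟨by omega, by omega, ?_⟩
          intro j hj
          have hj0 : j = 0 := by omega
          subst hj0
          simpa using ‹_›
      · rintro ⟨h1, h2, h3⟩
        have hm : m = 0 := by omega
        subst hm
        have := h3 0 (by omega)
        simp at this
        rcases x with _ | x' <;> simp [pvD, this]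
  | succ y ih =>
    intro x n
    rcases n with _ | m
    · simp
    · rcases x with _ | x'
      · -- x = 0
        simp only [pvD]
        by_cases hc : c (y+1) 0 = true
        · rw [if_pos hc]
          constructor
          · intro h
            refine ⟨by omega, by omega, ?_⟩
            intro j hj
            have hm : m = 0 := by omega
            have hj0 : j = 0 := by omega
            subst hj0
            simpa using hc
          · rintro ⟨h1, h2, h3⟩
            omega
        · rw [if_neg hc]
          constructor
          · omega
          · rintro ⟨h1, h2, h3⟩
            exfalso
            have := h3 0 (by omega)
            simp at this
            exact hc this
      · simp only [pvD]
        by_cases hc : c (y+1) (x'+1) = true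
        · rw [if_pos hc]
          have hih := ih x' m
          constructor
          · intro h
            have hm : m ≤ pvD c y x' := by omega
            obtain ⟨h1, h2, h3⟩ := hih.mp hm
            refine ⟨by omega, by omega, ?_⟩
            intro j hj
            rcases j with _ | j'
            · simpa using hc
            · have e1 : y + 1 - (j'+1) = y - j' := by omega
              have e2 : x' + 1 - (j'+1) = x' - j' := by omega
              rw [e1, e2]; exact h3 j' (by omega)
          · rintro ⟨h1, h2, h3⟩
            have hm : m ≤ pvD c y x' := by
              apply hih.mpr
              refine ⟨by omega, by omega, ?_⟩
              intro j hj
              have e1 : y - j = y + 1 - (j+1) := by omega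
              have e2 : x' - j = x' + 1 - (j+1) := by omega
              rw [e1, e2]; exact h3 (j+1) (by omega)
            omega
        · rw [if_neg hc]
          constructor
          · omega
          · rintro ⟨h1, h2, h3⟩
            exfalso
            have := h3 0 (by omega)
            simp at this
            exact hc this
def pvPrevV (c : Nat → Nat → Bool) : Nat → Nat → Nat
  | 0, _ => 0
  | y+1, x => pvV c y x

def pvPrevD (c : Nat → Nat → Bool) : Nat → Nat → Nat
  | 0, _ => 0
  | y+1, x => pvD c y x

def pvPrevA (c : Nat → Nat → Bool) : Nat → Nat → Nat
  | 0, _ => 0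
  | y+1, x => pvA c y x

def pvPreD (c : Nat → Nat → Bool) (y t : Nat) : Nat := if t = 0 then 0 else pvPrevD c y (t-1)
def pvPreH (c : Nat → Nat → Bool) (y t : Nat) : Nat := if t = 0 then 0 else pvHrow c y (t-1)

lemma pvV_eq (c : Nat → Nat → Bool) (y x : Nat) :
    pvV c y x = if c y x then pvPrevV c y x + 1 else 0 := by
  cases y <;> simp [pvV, pvPrevV]

lemma pvD_eq (c : Nat → Nat → Bool) (y x : Nat) :
    pvD c y x = if c y x then pvPreD c y x + 1 else 0 := by
  cases y <;> cases x <;> simp [pvD, pvPreD, pvPrevD]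

lemma pvA_eq (c : Nat → Nat → Bool) (y x : Nat) :
    pvA c y x = if c y x then pvPrevA c y (x+1) + 1 else 0 := by
  cases y <;> simp [pvA, pvPrevA]

lemma pvHrow_eq (c : Nat → Nat → Bool) (y x : Nat) :
    pvHrow c y x = if c y x then pvPreH c y x + 1 else 0 := by
  cases x <;> simp [pvHrow, pvPreH]

-- direction bridges: a forward run of length n exists iff some cell carries a backward streak ≥ n
lemma dirH (c : Nat → Nat → Bool) (n : Nat) :
    (∃ y x, c y x = true ∧ ∀ i, i < n → c y (x+i) = true) ↔
    (∃ y x, c y x = true ∧ n ≤ pvHrow c y x) := by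
  rcases n with _ | m
  · simp
  · constructor
    · rintro ⟨y, x, hc, hall⟩
      refine ⟨y, x + m, hall m (by omega), ?_⟩
      rw [pvHrow_ge]
      refine ⟨by omega, ?_⟩
      intro j hj
      have : x + m - j = x + (m - j) := by omega
      rw [this]; exact hall (m - j) (by omega)
    · rintro ⟨y, x, hc, hge⟩
      rw [pvHrow_ge] at hge
      obtain ⟨h1, h2⟩ := hge
      refine ⟨y, x - m, ?_, ?_⟩
      · have : x - m = x - m := rfl
        have := h2 m (by omega)
        exact this
      · intro i hi
        have : x - m + i = x - (m - i) := by omega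
        rw [this]; exact h2 (m - i) (by omega)

lemma dirV (c : Nat → Nat → Bool) (n : Nat) :
    (∃ y x, c y x = true ∧ ∀ i, i < n → c (y+i) x = true) ↔
    (∃ y x, c y x = true ∧ n ≤ pvV c y x) := by
  rcases n with _ | m
  · simp
  · constructor
    · rintro ⟨y, x, hc, hall⟩
      refine ⟨y + m, x, hall m (by omega), ?_⟩
      rw [pvV_ge]
      refine ⟨by omega, ?_⟩
      intro j hj
      have : y + m - j = y + (m - j) := by omega
      rw [this]; exact hall (m - j) (by omega)
    · rintro ⟨y, x, hc, hge⟩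
      rw [pvV_ge] at hge
      obtain ⟨h1, h2⟩ := hge
      refine ⟨y - m, x, h2 m (by omega), ?_⟩
      intro i hi
      have : y - m + i = y - (m - i) := by omega
      rw [this]; exact h2 (m - i) (by omega)

lemma dirD (c : Nat → Nat → Bool) (n : Nat) :
    (∃ y x, c y x = true ∧ ∀ i, i < n → c (y+i) (x+i) = true) ↔
    (∃ y x, c y x = true ∧ n ≤ pvD c y x) := by
  rcases n with _ | m
  · simp
  · constructor
    · rintro ⟨y, x, hc, hall⟩
      refine ⟨y + m, x + m, hall m (by omega), ?_⟩
      rw [pvD_ge]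
      refine ⟨by omega, by omega, ?_⟩
      intro j hj
      have e1 : y + m - j = y + (m - j) := by omega
      have e2 : x + m - j = x + (m - j) := by omega
      rw [e1, e2]; exact hall (m - j) (by omega)
    · rintro ⟨y, x, hc, hge⟩
      rw [pvD_ge] at hge
      obtain ⟨h1, h2, h3⟩ := hge
      refine ⟨y - m, x - m, h3 m (by omega), ?_⟩
      intro i hi
      have e1 : y - m + i = y - (m - i) := by omega
      have e2 : x - m + i = x - (m - i) := by omega
      rw [e1, e2]; exact h3 (m - i) (by omega)

lemma dirA (c : Nat → Nat → Bool) (n : Nat) :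
    (∃ y x, c y x = true ∧ ∀ i, i < n → i ≤ x ∧ c (y+i) (x-i) = true) ↔
    (∃ y x, c y x = true ∧ n ≤ pvA c y x) := by
  rcases n with _ | m
  · simp
  · constructor
    · rintro ⟨y, x, hc, hall⟩
      obtain ⟨hmx, hcm⟩ := hall m (by omega)
      refine ⟨y + m, x - m, hcm, ?_⟩
      rw [pvA_ge]
      refine ⟨by omega, ?_⟩
      intro j hj
      have e1 : y + m - j = y + (m - j) := by omega
      have e2 : x - m + j = x - (m - j) := by omega
      rw [e1, e2]; exact (hall (m - j) (by omega)).2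
    · rintro ⟨y, x, hc, hge⟩
      rw [pvA_ge] at hge
      obtain ⟨h1, h2⟩ := hge
      refine ⟨y - m, x + m, h2 m (by omega), ?_⟩
      intro i hi
      refine ⟨by omega, ?_⟩
      have e1 : y - m + i = y - (m - i) := by omega
      have e2 : x + m - i = x + (m - i) := by omega
      rw [e1, e2]; exact h2 (m - i) (by omega)
def pvTrig (c : Nat → Nat → Bool) (g : Int) (y x : Nat) : Bool :=
  c y x && (((pvHrow c y x : Int) ≥ g) || ((pvV c y x : Int) ≥ g) ||
            ((pvD c y x : Int) ≥ g) || ((pvA c y x : Int) ≥ g))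

lemma pvMapShift (f : Nat → Int) (m x0 : Nat) :
    (List.range (m+1)).map (fun j => f (x0+j)) = f x0 :: (List.range m).map (fun j => f (x0+1+j)) := by
  rw [List.range_succ_eq_map]
  simp only [List.map_cons, Nat.add_zero, List.map_map]
  refine congrArg _ ?_
  apply List.map_congr_left
  intro j _
  simp only [Function.comp_apply, Nat.succ_eq_add_one]
  congr 1
  omega
lemma pvRowLoop_spec (c : Nat → Nat → Bool) (player g : Int) (y W : Nat) (row : List Int)
    (hlen : W ≤ row.length)
    (hc : ∀ x, x < W → c y x = ((row.getD x 0) == player)) :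
    ∀ n x0, x0 + n = W →
      ((pvRowLoop player g (row.drop x0)
        ((List.range n).map fun j => ((pvPrevV c y (x0+j) : Nat) : Int))
        ((List.range (n+1)).map fun j => ((pvPreD c y (x0+j) : Nat) : Int))
        ((List.range n).map fun j => ((pvPrevA c y (x0+j+1) : Nat) : Int))
        ((pvPreH c y x0 : Nat) : Int)
        = none) ↔ (∃ x, x0 ≤ x ∧ x < W ∧ pvTrig c g y x = true))
      ∧ (¬ (∃ x, x0 ≤ x ∧ x < W ∧ pvTrig c g y x = true) →
          pvRowLoop player g (row.drop x0)
            ((List.range n).map fun j => ((pvPrevV c y (x0+j) : Nat) : Int))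
            ((List.range (n+1)).map fun j => ((pvPreD c y (x0+j) : Nat) : Int))
            ((List.range n).map fun j => ((pvPrevA c y (x0+j+1) : Nat) : Int))
            ((pvPreH c y x0 : Nat) : Int) =
            some ((List.range n).map fun j => ((pvV c y (x0+j) : Nat) : Int),
                  (List.range n).map fun j => ((pvD c y (x0+j) : Nat) : Int),
                  (List.range n).map fun j => ((pvA c y (x0+j) : Nat) : Int))) := by
  intro n
  induction n with
  | zero =>
    intro x0 hx0
    constructor
    · constructor
      · intro h
        cases hrw : row.drop x0 with
        | nil => rw [hrw] at h; simp [pvRowLoop] at h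
        | cons v t => rw [hrw] at h; simp [pvRowLoop] at h
      · rintro ⟨x, hx1, hx2, _⟩
        omega
    · intro _
      cases hrw : row.drop x0 with
      | nil => simp [pvRowLoop]
      | cons v t => simp [pvRowLoop]
  | succ m ih =>
    intro x0 hx0
    have hx0W : x0 < W := by omega
    have hx0len : x0 < row.length := by omega
    have hd : row.drop x0 = row[x0] :: row.drop (x0+1) := List.drop_eq_getElem_cons hx0len
    have hgetD : row.getD x0 0 = row[x0] := List.getD_eq_getElem row 0 hx0len
    have hcx0 : c y x0 = (row[x0] == player) := by rw [hc x0 hx0W, hgetD]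
    have eV := pvMapShift (fun t => ((pvPrevV c y t : Nat) : Int)) m x0
    have eD := pvMapShift (fun t => ((pvPreD c y t : Nat) : Int)) (m+1) x0
    have eA := pvMapShift (fun t => ((pvPrevA c y (t+1) : Nat) : Int)) m x0
    have eVout := pvMapShift (fun t => ((pvV c y t : Nat) : Int)) m x0
    have eDout := pvMapShift (fun t => ((pvD c y t : Nat) : Int)) m x0
    have eAout := pvMapShift (fun t => ((pvA c y t : Nat) : Int)) m x0
    simp only [] at eV eD eA eVout eDout eAout
    have ih' := ih (x0+1) (by omega)
    rw [hd, eV, eD, eA, eVout, eDout, eAout]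
    have hEx0 : ∀ (h0 : pvTrig c g y x0 = false),
        ((∃ x, x0 ≤ x ∧ x < W ∧ pvTrig c g y x = true) ↔
         (∃ x, x0+1 ≤ x ∧ x < W ∧ pvTrig c g y x = true)) := by
      intro h0
      constructor
      · rintro ⟨x, hx1, hx2, hx3⟩
        rcases Nat.eq_or_lt_of_le hx1 with rfl | h
        · rw [h0] at hx3; exact absurd hx3 (by simp)
        · exact ⟨x, by omega, hx2, hx3⟩
      · rintro ⟨x, hx1, hx2, hx3⟩; exact ⟨x, by omega, hx2, hx3⟩
    by_cases hcb : c y x0 = true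
    · -- player cell
      have hvp : (row[x0] == player) = true := by rw [← hcx0]; exact hcb
      have hrun : ((pvPreH c y x0 : Nat) : Int) + 1 = ((pvHrow c y x0 : Nat) : Int) := by
        rw [pvHrow_eq, if_pos hcb]; push_cast; ring
      have ha : ((pvPrevV c y x0 : Nat) : Int) + 1 = ((pvV c y x0 : Nat) : Int) := by
        rw [pvV_eq, if_pos hcb]; push_cast; ring
      have hb : ((pvPreD c y x0 : Nat) : Int) + 1 = ((pvD c y x0 : Nat) : Int) := by
        rw [pvD_eq, if_pos hcb]; push_cast; ring
      have hc3 : ((pvPrevA c y (x0+1) : Nat) : Int) + 1 = ((pvA c y x0 : Nat) : Int) := by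
        rw [pvA_eq, if_pos hcb]; push_cast; ring
      have hpreH1 : ((pvPreH c y (x0+1) : Nat) : Int) = ((pvHrow c y x0 : Nat) : Int) := by
        simp [pvPreH]
      simp only [pvRowLoop, hvp, if_true]
      rw [hrun, ha, hb, hc3]
      by_cases htrig : (((pvHrow c y x0 : Nat) : Int) ≥ g || ((pvV c y x0 : Nat) : Int) ≥ g ||
          ((pvD c y x0 : Nat) : Int) ≥ g || ((pvA c y x0 : Nat) : Int) ≥ g) = true
      · have htr : pvTrig c g y x0 = true := by
          rw [pvTrig, hcb, htrig]; rfl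
        rw [if_pos htrig]
        constructor
        · exact ⟨fun _ => ⟨x0, by omega, hx0W, htr⟩, fun _ => rfl⟩
        · intro hne
          exact absurd ⟨x0, by omega, hx0W, htr⟩ hne
      · have htr : pvTrig c g y x0 = false := by
          rw [pvTrig, hcb]
          simp only [Bool.true_and]
          exact Bool.not_eq_true _ ▸ (by simpa using htrig)
        rw [if_neg (by simpa using htrig)]
        rw [← hpreH1]
        rw [hEx0 htr]
        constructor
        · rw [← ih'.1]
          cases hrec : pvRowLoop player g (row.drop (x0+1))
              ((List.range m).map fun j => ((pvPrevV c y (x0+1+j) : Nat) : Int))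
              ((List.range (m+1)).map fun j => ((pvPreD c y (x0+1+j) : Nat) : Int))
              ((List.range m).map fun j => ((pvPrevA c y (x0+1+j+1) : Nat) : Int))
              ((pvPreH c y (x0+1) : Nat) : Int) with
          | none => simp
          | some v => rcases v with ⟨d, r, l⟩; simp
        · intro hne
          rw [ih'.2 hne]
    · -- non-player cell
      have hvp : (row[x0] == player) = false := by
        rw [← hcx0]; exact Bool.not_eq_true _ ▸ hcb
      have hV0 : ((pvV c y x0 : Nat) : Int) = 0 := by rw [pvV_eq, if_neg hcb]; rfl
      have hD0 : ((pvD c y x0 : Nat) : Int) = 0 := by rw [pvD_eq, if_neg hcb]; rfl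
      have hA0 : ((pvA c y x0 : Nat) : Int) = 0 := by rw [pvA_eq, if_neg hcb]; rfl
      have hpreH1 : ((pvPreH c y (x0+1) : Nat) : Int) = 0 := by
        simp [pvPreH, pvHrow_eq, hcb]
      have htr : pvTrig c g y x0 = false := by
        rw [pvTrig]
        simp [hcb]
      simp only [pvRowLoop, hvp, Bool.false_eq_true, if_false]
      rw [← hpreH1]
      rw [hEx0 htr]
      constructor
      · rw [← ih'.1]
        cases hrec : pvRowLoop player g (row.drop (x0+1))
            ((List.range m).map fun j => ((pvPrevV c y (x0+1+j) : Nat) : Int))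
            ((List.range (m+1)).map fun j => ((pvPreD c y (x0+1+j) : Nat) : Int))
            ((List.range m).map fun j => ((pvPrevA c y (x0+1+j+1) : Nat) : Int))
            ((pvPreH c y (x0+1) : Nat) : Int) with
        | none => simp
        | some v => rcases v with ⟨d, r, l⟩; simp
      · intro hne
        rw [ih'.2 hne]
        simp [hpreH1]
        exact ⟨hV0.symm, hD0.symm, hA0.symm⟩
def pvC (board : List (List Int)) (player : Int) (y x : Nat) : Bool :=
  decide (y < board.length) && decide (x < (board.headD []).length) &&
    ((board.getD y []).getD x 0 == player)

lemma pvPrevV_succ (c : Nat → Nat → Bool) (y x : Nat) : pvPrevV c (y+1) x = pvV c y x := rfl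
lemma pvPrevD_succ (c : Nat → Nat → Bool) (y x : Nat) : pvPrevD c (y+1) x = pvD c y x := rfl
lemma pvPrevA_succ (c : Nat → Nat → Bool) (y x : Nat) : pvPrevA c (y+1) x = pvA c y x := rfl

lemma pvConsShape (c : Nat → Nat → Bool) (y W : Nat) :
    (0 : Int) :: ((List.range W).map fun x => ((pvPrevD c y x : Nat) : Int)) =
      (List.range (W+1)).map fun j => ((pvPreD c y j : Nat) : Int) := by
  rw [List.range_succ_eq_map]
  simp only [List.map_cons, List.map_map]
  congr 1

lemma pvDropShape (f : Nat → Int) (W : Nat) (hW : 0 < W) (hfW : f W = 0) :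
    ((List.range W).map f).drop 1 ++ [(0 : Int)] = (List.range W).map fun j => f (j+1) := by
  obtain ⟨V, rfl⟩ : ∃ V, W = V + 1 := ⟨W - 1, by omega⟩
  have h1 : (List.range (V+1)).map f = f 0 :: (List.range V).map fun j => f (j+1) := by
    rw [List.range_succ_eq_map]
    simp only [List.map_cons, List.map_map]
    rfl
  rw [h1]
  simp only [List.drop_succ_cons, List.drop_zero]
  rw [← hfW]
  rw [show (List.range (V+1)).map (fun j => f (j+1)) =
        ((List.range V).map fun j => f (j+1)) ++ [f (V+1)] by
    rw [List.range_succ, List.map_append]; simp]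

lemma pvPrevA_W (board : List (List Int)) (player : Int) (y : Nat) :
    pvPrevA (pvC board player) y (board.headD []).length = 0 := by
  cases y with
  | zero => rfl
  | succ y' =>
    rw [pvPrevA_succ, pvA_eq]
    simp [pvC]

lemma pvRows_spec (board : List (List Int)) (player g : Int)
    (hpre : ∀ r ∈ board, (board.headD []).length ≤ r.length)
    (hW : 0 < (board.headD []).length) :
    ∀ k y0, y0 + k = board.length →
      ((pvRows player g (board.drop y0)
        ((List.range (board.headD []).length).map fun x => ((pvPrevV (pvC board player) y0 x : Nat) : Int))
        ((List.range (board.headD []).length).map fun x => ((pvPrevD (pvC board player) y0 x : Nat) : Int))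
        ((List.range (board.headD []).length).map fun x => ((pvPrevA (pvC board player) y0 x : Nat) : Int)) = true)
      ↔ ∃ y, y0 ≤ y ∧ y < board.length ∧ ∃ x, x < (board.headD []).length ∧
          pvTrig (pvC board player) g y x = true) := by
  set c := pvC board player with hcdef
  set W := (board.headD []).length with hWdef
  intro k
  induction k with
  | zero =>
    intro y0 hy0
    have : board.drop y0 = [] := by
      apply List.drop_eq_nil_of_le; omega
    rw [this]
    simp only [pvRows]
    constructor
    · intro h; exact absurd h (by simp)
    · rintro ⟨y, h1, h2, _⟩; omega
  | succ m ih =>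
    intro y0 hy0
    have hy0len : y0 < board.length := by omega
    have hd : board.drop y0 = board[y0] :: board.drop (y0+1) := List.drop_eq_getElem_cons hy0len
    have hrowlen : W ≤ board[y0].length := hpre _ (List.getElem_mem hy0len)
    have hc : ∀ x, x < W → c y0 x = ((board[y0].getD x 0) == player) := by
      intro x hx
      rw [hcdef]
      simp only [pvC, hy0len, decide_true, ← hWdef, hx, Bool.true_and]
      rw [List.getD_eq_getElem board [] hy0len]
    have hspec := pvRowLoop_spec c player g y0 W board[y0] hrowlen hc W 0 (by omega)
    simp only [Nat.zero_add, Nat.zero_le, true_and, List.drop_zero] at hspec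
    rw [hd]
    simp only [pvRows]
    rw [pvConsShape c y0 W]
    rw [show ((List.range W).map fun x => ((pvPrevA c y0 x : Nat) : Int)).drop 1 ++ [(0:Int)] =
          (List.range W).map (fun j => ((pvPrevA c y0 (j+1) : Nat) : Int)) from
      pvDropShape _ W hW (by rw [hcdef, hWdef, pvPrevA_W board player y0]; simp)]
    rw [show (0 : Int) = ((pvPreH c y0 0 : Nat) : Int) by simp [pvPreH]]
    by_cases hEx : ∃ x, x < W ∧ pvTrig c g y0 x = true
    · rw [hspec.1.mpr hEx]
      simp only [true_iff]
      obtain ⟨x, hx1, hx2⟩ := hEx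
      exact ⟨y0, by omega, hy0len, x, hx1, hx2⟩
    · rw [hspec.2 hEx]
      have ih' := ih (y0+1) (by omega)
      simp only [pvPrevV_succ, pvPrevD_succ, pvPrevA_succ] at ih'
      rw [ih']
      constructor
      · rintro ⟨y, h1, h2, hx⟩
        exact ⟨y, by omega, h2, hx⟩
      · rintro ⟨y, h1, h2, x, hx1, hx2⟩
        rcases Nat.eq_or_lt_of_le h1 with rfl | h
        · exact absurd ⟨x, hx1, hx2⟩ hEx
        · exact ⟨y, by omega, h2, x, hx1, hx2⟩
lemma pvC_true_bounds {board : List (List Int)} {player : Int} {y x : Nat}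
    (h : pvC board player y x = true) :
    y < board.length ∧ x < (board.headD []).length := by
  simp only [pvC, Bool.and_eq_true, decide_eq_true_eq] at h
  exact ⟨h.1.1, h.1.2⟩

lemma pvCell_eq (board : List (List Int)) (player : Int)
    (hpre : ∀ r ∈ board, (board.headD []).length ≤ r.length)
    (y x : Nat) (hy : y < board.length) (hx : x < (board.headD []).length) :
    ((pvCell? board (y : Int) (x : Int)) == some player) = pvC board player y x := by
  have hxlen : x < board[y].length := lt_of_lt_of_le hx (hpre _ (List.getElem_mem hy))
  have h1 : PySem.List.pyGet? board (y : Int) = some board[y] :=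
    PySem.List.pyGet?_ofNat board y hy
  have h2 : PySem.List.pyGet? board[y] (x : Int) = some board[y][x] :=
    PySem.List.pyGet?_ofNat board[y] x hxlen
  rw [pvCell?, h1]
  simp only [Option.bind_some]
  rw [h2]
  simp only [pvC, hy, hx, decide_true, Bool.true_and]
  rw [List.getD_eq_getElem board [] hy, List.getD_eq_getElem board[y] 0 hxlen]
  simp
lemma pvAll1_iff (board : List (List Int)) (player g : Int)
    (hpre : ∀ r ∈ board, (board.headD []).length ≤ r.length)
    (y x : Nat) (hy : y < board.length) (hx : x < (board.headD []).length) :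
    (((PySem.List.pyRange 0 g 1).all fun i =>
        if ((board.headD []).length : Int) ≤ (x : Int) + i then false
        else pvCell? board (y : Int) ((x : Int) + i) == some player) = true)
    ↔ ∀ i, i < g.toNat → pvC board player y (x+i) = true := by
  rw [List.all_eq_true]
  constructor
  · intro hall i hi
    have hmem : (i : Int) ∈ PySem.List.pyRange 0 g 1 :=
      PySem.List.mem_pyRange_one.mpr ⟨by omega, by omega⟩
    have hb := hall _ hmem
    by_cases hxi : x + i < (board.headD []).length
    · rw [if_neg (by push_cast; omega)] at hb
      rw [show (x : Int) + (i : Int) = ((x + i : Nat) : Int) by push_cast; ring] at hb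
      rw [pvCell_eq board player hpre y (x+i) hy hxi] at hb
      exact hb
    · rw [if_pos (by push_cast; omega)] at hb
      exact absurd hb (by simp)
  · intro h z hz
    rw [PySem.List.mem_pyRange_one] at hz
    have hzi : z = ((z.toNat : Nat) : Int) := by omega
    have hig : z.toNat < g.toNat := by omega
    have hc := h z.toNat hig
    have hbd := pvC_true_bounds hc
    rw [hzi, if_neg (by push_cast; omega)]
    rw [show (x : Int) + ((z.toNat : Nat) : Int) = ((x + z.toNat : Nat) : Int) by push_cast; ring]
    rw [pvCell_eq board player hpre y (x + z.toNat) hy hbd.2]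
    exact hc

lemma pvAll2_iff (board : List (List Int)) (player g : Int)
    (hpre : ∀ r ∈ board, (board.headD []).length ≤ r.length)
    (y x : Nat) (hy : y < board.length) (hx : x < (board.headD []).length) :
    (((PySem.List.pyRange 0 g 1).all fun i =>
        if (board.length : Int) ≤ (y : Int) + i then false
        else pvCell? board ((y : Int) + i) (x : Int) == some player) = true)
    ↔ ∀ i, i < g.toNat → pvC board player (y+i) x = true := by
  rw [List.all_eq_true]
  constructor
  · intro hall i hi
    have hmem : (i : Int) ∈ PySem.List.pyRange 0 g 1 :=
      PySem.List.mem_pyRange_one.mpr ⟨by omega, by omega⟩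
    have hb := hall _ hmem
    by_cases hyi : y + i < board.length
    · rw [if_neg (by push_cast; omega)] at hb
      rw [show (y : Int) + (i : Int) = ((y + i : Nat) : Int) by push_cast; ring] at hb
      rw [pvCell_eq board player hpre (y+i) x hyi hx] at hb
      exact hb
    · rw [if_pos (by push_cast; omega)] at hb
      exact absurd hb (by simp)
  · intro h z hz
    rw [PySem.List.mem_pyRange_one] at hz
    have hzi : z = ((z.toNat : Nat) : Int) := by omega
    have hig : z.toNat < g.toNat := by omega
    have hc := h z.toNat hig
    have hbd := pvC_true_bounds hc
    rw [hzi, if_neg (by push_cast; omega)]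
    rw [show (y : Int) + ((z.toNat : Nat) : Int) = ((y + z.toNat : Nat) : Int) by push_cast; ring]
    rw [pvCell_eq board player hpre (y + z.toNat) x hbd.1 hx]
    exact hc

lemma pvAll3_iff (board : List (List Int)) (player g : Int)
    (hpre : ∀ r ∈ board, (board.headD []).length ≤ r.length)
    (y x : Nat) (hy : y < board.length) (hx : x < (board.headD []).length) :
    (((PySem.List.pyRange 0 g 1).all fun i =>
        if ((board.headD []).length : Int) ≤ (x : Int) + i then false
        else if (board.length : Int) ≤ (y : Int) + i then false
        else pvCell? board ((y : Int) + i) ((x : Int) + i) == some player) = true)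
    ↔ ∀ i, i < g.toNat → pvC board player (y+i) (x+i) = true := by
  rw [List.all_eq_true]
  constructor
  · intro hall i hi
    have hmem : (i : Int) ∈ PySem.List.pyRange 0 g 1 :=
      PySem.List.mem_pyRange_one.mpr ⟨by omega, by omega⟩
    have hb := hall _ hmem
    by_cases hxi : x + i < (board.headD []).length
    · rw [if_neg (by push_cast; omega)] at hb
      by_cases hyi : y + i < board.length
      · rw [if_neg (by push_cast; omega)] at hb
        rw [show (y : Int) + (i : Int) = ((y + i : Nat) : Int) by push_cast; ring,
            show (x : Int) + (i : Int) = ((x + i : Nat) : Int) by push_cast; ring] at hb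
        rw [pvCell_eq board player hpre (y+i) (x+i) hyi hxi] at hb
        exact hb
      · rw [if_pos (by push_cast; omega)] at hb
        exact absurd hb (by simp)
    · rw [if_pos (by push_cast; omega)] at hb
      exact absurd hb (by simp)
  · intro h z hz
    rw [PySem.List.mem_pyRange_one] at hz
    have hzi : z = ((z.toNat : Nat) : Int) := by omega
    have hig : z.toNat < g.toNat := by omega
    have hc := h z.toNat hig
    have hbd := pvC_true_bounds hc
    rw [hzi, if_neg (by push_cast; omega), if_neg (by push_cast; omega)]
    rw [show (y : Int) + ((z.toNat : Nat) : Int) = ((y + z.toNat : Nat) : Int) by push_cast; ring,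
        show (x : Int) + ((z.toNat : Nat) : Int) = ((x + z.toNat : Nat) : Int) by push_cast; ring]
    rw [pvCell_eq board player hpre (y + z.toNat) (x + z.toNat) hbd.1 hbd.2]
    exact hc

lemma pvAll4_iff (board : List (List Int)) (player g : Int)
    (hpre : ∀ r ∈ board, (board.headD []).length ≤ r.length)
    (y x : Nat) (hy : y < board.length) (hx : x < (board.headD []).length) :
    (((PySem.List.pyRange 0 g 1).all fun i =>
        if (x : Int) - i < 0 then false
        else if (board.length : Int) ≤ (y : Int) + i then false
        else pvCell? board ((y : Int) + i) ((x : Int) - i) == some player) = true)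
    ↔ ∀ i, i < g.toNat → i ≤ x ∧ pvC board player (y+i) (x-i) = true := by
  rw [List.all_eq_true]
  constructor
  · intro hall i hi
    have hmem : (i : Int) ∈ PySem.List.pyRange 0 g 1 :=
      PySem.List.mem_pyRange_one.mpr ⟨by omega, by omega⟩
    have hb := hall _ hmem
    by_cases hix : i ≤ x
    · rw [if_neg (by push_cast; omega)] at hb
      by_cases hyi : y + i < board.length
      · rw [if_neg (by push_cast; omega)] at hb
        rw [show (y : Int) + (i : Int) = ((y + i : Nat) : Int) by push_cast; ring,
            show (x : Int) - (i : Int) = ((x - i : Nat) : Int) by omega] at hb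
        rw [pvCell_eq board player hpre (y+i) (x-i) hyi (by omega)] at hb
        exact ⟨hix, hb⟩
      · rw [if_pos (by push_cast; omega)] at hb
        exact absurd hb (by simp)
    · rw [if_pos (by push_cast; omega)] at hb
      exact absurd hb (by simp)
  · intro h z hz
    rw [PySem.List.mem_pyRange_one] at hz
    have hzi : z = ((z.toNat : Nat) : Int) := by omega
    have hig : z.toNat < g.toNat := by omega
    obtain ⟨hix, hc⟩ := h z.toNat hig
    have hbd := pvC_true_bounds hc
    rw [hzi, if_neg (by push_cast; omega), if_neg (by push_cast; omega)]
    rw [show (y : Int) + ((z.toNat : Nat) : Int) = ((y + z.toNat : Nat) : Int) by push_cast; ring,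
        show (x : Int) - ((z.toNat : Nat) : Int) = ((x - z.toNat : Nat) : Int) by omega]
    rw [pvCell_eq board player hpre (y + z.toNat) (x - z.toNat) hbd.1 hbd.2]
    exact hc
lemma pvA_char (board : List (List Int)) (player g : Int)
    (hne : board ≠ [])
    (hpre : ∀ r ∈ board, (board.headD []).length ≤ r.length) :
    (my_check_win board player g = true) ↔
    ∃ y x : Nat, pvC board player y x = true ∧
      ((∀ i, i < g.toNat → pvC board player y (x+i) = true) ∨
       (∀ i, i < g.toNat → pvC board player (y+i) x = true) ∨
       (∀ i, i < g.toNat → pvC board player (y+i) (x+i) = true) ∨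
       (∀ i, i < g.toNat → i ≤ x ∧ pvC board player (y+i) (x-i) = true)) := by
  obtain ⟨b0, rest, rfl⟩ : ∃ b0 rest, board = b0 :: rest := by
    cases board with
    | nil => exact absurd rfl hne
    | cons a l => exact ⟨a, l, rfl⟩
  set board := b0 :: rest with hbdef
  have hys : PySem.List.len board = (board.length : Int) := by
    simp [PySem.List.len_eq]
  have hxs : PySem.List.len ((PySem.List.pyGet? board 0).getD []) =
      ((board.headD []).length : Int) := by
    rw [hbdef, PySem.List.pyGet?_zero_cons]
    simp [PySem.List.len_eq]
  rw [my_check_win]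
  simp only [hys, hxs]
  rw [List.any_eq_true]
  constructor
  · rintro ⟨yi, hymem, hbody⟩
    rw [PySem.List.mem_pyRange_one] at hymem
    rw [List.any_eq_true] at hbody
    obtain ⟨xi, hxmem, hcell⟩ := hbody
    rw [PySem.List.mem_pyRange_one] at hxmem
    have hyeq : yi = ((yi.toNat : Nat) : Int) := by omega
    have hxeq : xi = ((xi.toNat : Nat) : Int) := by omega
    set y := yi.toNat
    set x := xi.toNat
    have hy : y < board.length := by omega
    have hx : x < (board.headD []).length := by omega
    rw [hyeq, hxeq] at hcell
    rw [Bool.and_eq_true] at hcell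
    obtain ⟨hc1, hc2⟩ := hcell
    rw [pvCell_eq board player hpre y x hy hx] at hc1
    refine ⟨y, x, hc1, ?_⟩
    simp only [Bool.or_eq_true] at hc2
    rcases hc2 with ((h1 | h2) | h3) | h4
    · exact Or.inl ((pvAll1_iff board player g hpre y x hy hx).mp h1)
    · exact Or.inr (Or.inl ((pvAll2_iff board player g hpre y x hy hx).mp h2))
    · exact Or.inr (Or.inr (Or.inl ((pvAll3_iff board player g hpre y x hy hx).mp h3)))
    · exact Or.inr (Or.inr (Or.inr ((pvAll4_iff board player g hpre y x hy hx).mp h4)))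
  · rintro ⟨y, x, hc, hdir⟩
    obtain ⟨hy, hx⟩ := pvC_true_bounds hc
    refine ⟨(y : Int), PySem.List.mem_pyRange_one.mpr ⟨by omega, by omega⟩, ?_⟩
    rw [List.any_eq_true]
    refine ⟨(x : Int), PySem.List.mem_pyRange_one.mpr ⟨by omega, by omega⟩, ?_⟩
    rw [Bool.and_eq_true]
    constructor
    · rw [pvCell_eq board player hpre y x hy hx]
      exact hc
    · simp only [Bool.or_eq_true]
      rcases hdir with h1 | h2 | h3 | h4
      · exact Or.inl (Or.inl (Or.inl ((pvAll1_iff board player g hpre y x hy hx).mpr h1)))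
      · exact Or.inl (Or.inl (Or.inr ((pvAll2_iff board player g hpre y x hy hx).mpr h2)))
      · exact Or.inl (Or.inr ((pvAll3_iff board player g hpre y x hy hx).mpr h3))
      · exact Or.inr ((pvAll4_iff board player g hpre y x hy hx).mpr h4)
lemma pvRows_zeroW (player g : Int) :
    ∀ rows : List (List Int), pvRows player g rows [] [] [] = false := by
  intro rows
  induction rows with
  | nil => simp [pvRows]
  | cons row rest ih =>
    cases row with
    | nil => simp [pvRows, pvRowLoop, ih]
    | cons v t => simp [pvRows, pvRowLoop, ih]

lemma pvPrevV_zero (c : Nat → Nat → Bool) (x : Nat) : pvPrevV c 0 x = 0 := rfl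
lemma pvPrevD_zero (c : Nat → Nat → Bool) (x : Nat) : pvPrevD c 0 x = 0 := rfl
lemma pvPrevA_zero (c : Nat → Nat → Bool) (x : Nat) : pvPrevA c 0 x = 0 := rfl

lemma pvB_char (board : List (List Int)) (player g : Int)
    (hne : board ≠ [])
    (hpre : ∀ r ∈ board, (board.headD []).length ≤ r.length) :
    (my_check_win_alt board player g = true) ↔
    ∃ y, y < board.length ∧ ∃ x, x < (board.headD []).length ∧
      pvTrig (pvC board player) g y x = true := by
  obtain ⟨b0, rest, rfl⟩ : ∃ b0 rest, board = b0 :: rest := by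
    cases board with
    | nil => exact absurd rfl hne
    | cons a l => exact ⟨a, l, rfl⟩
  set board := b0 :: rest with hbdef
  have hW0 : (board.headD []).length = b0.length := rfl
  rw [my_check_win_alt]
  by_cases hW : 0 < b0.length
  · have hspec := pvRows_spec board player g hpre (by rw [hW0]; exact hW)
        board.length 0 (by omega)
    rw [List.drop_zero] at hspec
    simp only [pvPrevV_zero, pvPrevD_zero, pvPrevA_zero, Nat.cast_zero,
      List.map_const', List.length_range, hW0] at hspec
    rw [hspec]
    constructor
    · rintro ⟨y, _, hy, hx⟩
      exact ⟨y, hy, hx⟩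
    · rintro ⟨y, hy, x, hx, htr⟩
      exact ⟨y, by omega, hy, x, hx, htr⟩
  · have hb0 : b0.length = 0 := by omega
    rw [hb0]
    simp only [List.replicate]
    rw [pvRows_zeroW]
    constructor
    · intro h; exact absurd h (by simp)
    · rintro ⟨y, hy, x, hx, _⟩
      rw [hW0] at hx
      omega
lemma pvTrig_iff (c : Nat → Nat → Bool) (g : Int) (y x : Nat) :
    pvTrig c g y x = true ↔
    (c y x = true ∧ (g.toNat ≤ pvHrow c y x ∨ g.toNat ≤ pvV c y x ∨
      g.toNat ≤ pvD c y x ∨ g.toNat ≤ pvA c y x)) := by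
  simp only [pvTrig, Bool.and_eq_true, Bool.or_eq_true, decide_eq_true_eq, ge_iff_le]
  constructor
  · rintro ⟨h, hd⟩
    exact ⟨h, by omega⟩
  · rintro ⟨h, hd⟩
    exact ⟨h, by omega⟩

lemma pvMain_iff (board : List (List Int)) (player g : Int)
    (hne : board ≠ [])
    (hpre : ∀ r ∈ board, (board.headD []).length ≤ r.length) :
    my_check_win board player g = my_check_win_alt board player g := by
  rw [Bool.eq_iff_iff]
  rw [pvA_char board player g hne hpre, pvB_char board player g hne hpre]
  set c := pvC board player with hcdef
  set n := g.toNat with hndef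
  have hBside : (∃ y, y < board.length ∧ ∃ x, x < (board.headD []).length ∧
      pvTrig c g y x = true) ↔
      ∃ y x, c y x = true ∧ (n ≤ pvHrow c y x ∨ n ≤ pvV c y x ∨
        n ≤ pvD c y x ∨ n ≤ pvA c y x) := by
    constructor
    · rintro ⟨y, hy, x, hx, htr⟩
      exact ⟨y, x, (pvTrig_iff c g y x).mp htr⟩
    · rintro ⟨y, x, h⟩
      have hb := pvC_true_bounds (board := board) (player := player) (by rw [← hcdef]; exact h.1)
      exact ⟨y, hb.1, x, hb.2, (pvTrig_iff c g y x).mpr h⟩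
  rw [hBside]
  have hdist : (∃ y x : Nat, c y x = true ∧
      ((∀ i, i < n → c y (x+i) = true) ∨
       (∀ i, i < n → c (y+i) x = true) ∨
       (∀ i, i < n → c (y+i) (x+i) = true) ∨
       (∀ i, i < n → i ≤ x ∧ c (y+i) (x-i) = true))) ↔
      ((∃ y x, c y x = true ∧ ∀ i, i < n → c y (x+i) = true) ∨
       (∃ y x, c y x = true ∧ ∀ i, i < n → c (y+i) x = true) ∨
       (∃ y x, c y x = true ∧ ∀ i, i < n → c (y+i) (x+i) = true) ∨
       (∃ y x, c y x = true ∧ ∀ i, i < n → i ≤ x ∧ c (y+i) (x-i) = true)) := by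
    constructor
    · rintro ⟨y, x, hc, h1 | h2 | h3 | h4⟩
      · exact Or.inl ⟨y, x, hc, h1⟩
      · exact Or.inr (Or.inl ⟨y, x, hc, h2⟩)
      · exact Or.inr (Or.inr (Or.inl ⟨y, x, hc, h3⟩))
      · exact Or.inr (Or.inr (Or.inr ⟨y, x, hc, h4⟩))
    · rintro (⟨y, x, hc, h⟩ | ⟨y, x, hc, h⟩ | ⟨y, x, hc, h⟩ | ⟨y, x, hc, h⟩)
      · exact ⟨y, x, hc, Or.inl h⟩
      · exact ⟨y, x, hc, Or.inr (Or.inl h)⟩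
      · exact ⟨y, x, hc, Or.inr (Or.inr (Or.inl h))⟩
      · exact ⟨y, x, hc, Or.inr (Or.inr (Or.inr h))⟩
  rw [hdist, dirH c n, dirV c n, dirD c n, dirA c n]
  constructor
  · rintro (⟨y, x, hc, h⟩ | ⟨y, x, hc, h⟩ | ⟨y, x, hc, h⟩ | ⟨y, x, hc, h⟩)
    · exact ⟨y, x, hc, Or.inl h⟩
    · exact ⟨y, x, hc, Or.inr (Or.inl h)⟩
    · exact ⟨y, x, hc, Or.inr (Or.inr (Or.inl h))⟩
    · exact ⟨y, x, hc, Or.inr (Or.inr (Or.inr h))⟩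
  · rintro ⟨y, x, hc, h1 | h2 | h3 | h4⟩
    · exact Or.inl ⟨y, x, hc, h1⟩
    · exact Or.inr (Or.inl ⟨y, x, hc, h2⟩)
    · exact Or.inr (Or.inr (Or.inl ⟨y, x, hc, h3⟩))
    · exact Or.inr (Or.inr (Or.inr ⟨y, x, hc, h4⟩))

-- ===== VERDICT (by name: the statement is the Claim_ definition above) =====
theorem my_check_win_spec : Claim_equal_my_check_win := by
  intro board player goal_size _ hpre
  obtain ⟨hne, hp⟩ := hpre
  unfold Spec_my_check_win
  exact pvMain_iff board player goal_size hne hp
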